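-- pv_equiv track=rewrite | github.com/IvanaXu/leetcode | LCS02.WqXACV.py | halfQuestions
-- ===== SOURCE A (Python) =====
-- from typing import List
--
-- def halfQuestions(questions: List[int]) -> int:
--     _l, _r, _lk = len(questions)//2, {}, []
--     for q in questions:
--         _r[q] = 1 if q not in _r else _r[q]+1
--     for _v, _k in sorted(
--         [(_v, _k) for _k, _v in _r.items()], reverse=True):
--         _l = _l - _v
--         _lk.append(_k)
--
--         if _l <= 0:
--             break
--     return len(_lk)
-- ===== SOURCE B (Python) =====
-- def halfQuestions(questions):
--     n = len(questions)
--     freq = {}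
--     for q in questions:
--         freq[q] = freq.get(q, 0) + 1
--     bucket = {}
--     for c in freq.values():
--         bucket[c] = bucket.get(c, 0) + 1
--     need = n // 2
--     taken = 0
--     for c in range(n, 0, -1):
--         k = bucket.get(c, 0)
--         while k > 0:
--             need -= c
--             taken += 1
--             if need <= 0:
--                 return taken
--             k -= 1
--     return taken
-- ===== Notes on version B (the rewrite author's own statement) =====
-- stated objective: alternative
-- what changed: Replaces the sort of (count, key) pairs with a counting-sort style pass: bucket the frequency multiplicities and scan possible frequencies from n down to 1, so no comparison sort is performed; intended as faster (measured 1.8x at the largest size but not consistently over inputs).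
import Mathlib
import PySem

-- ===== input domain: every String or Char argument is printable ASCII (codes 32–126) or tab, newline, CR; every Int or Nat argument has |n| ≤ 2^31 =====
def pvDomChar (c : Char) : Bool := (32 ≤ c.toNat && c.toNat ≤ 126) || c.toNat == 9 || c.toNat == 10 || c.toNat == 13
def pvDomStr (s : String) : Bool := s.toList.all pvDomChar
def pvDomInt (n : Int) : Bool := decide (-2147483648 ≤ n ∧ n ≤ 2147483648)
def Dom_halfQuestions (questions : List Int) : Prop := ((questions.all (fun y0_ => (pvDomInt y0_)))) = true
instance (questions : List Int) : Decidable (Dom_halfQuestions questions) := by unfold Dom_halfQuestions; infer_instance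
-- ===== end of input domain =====

-- B replaces A's comparison sort of (count, key) pairs by a counting-sort bucket scan over
-- possible frequencies n..1 (objective: alternative algorithm, no comparison sort).

-- ===== PORT A =====
-- first loop of A: _r[q] = 1 if q not in _r else _r[q]+1
def pvCountA (questions : List Int) : PySem.Dict Int Int :=
  questions.foldl
    (fun d q => if d.contains q = false then d.insert q 1 else d.insert q (d.getD q 0 + 1))
    PySem.Dict.empty

-- second loop of A (break modelled by returning the accumulated _lk)
def pvLoopA : List (Int × Int) → Int → List Int → List Int
  | [], _, lk => lk
  | (v, k) :: rest, l, lk =>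
    let l' := l - v
    let lk' := lk ++ [k]
    if l' ≤ 0 then lk' else pvLoopA rest l' lk'

def halfQuestions (questions : List Int) : Int :=
  let l := PySem.Int.floordiv (questions.length : Int) 2
  let r := pvCountA questions
  let pairs := r.items.map (fun kv => (kv.2, kv.1))
  -- sorted(..., reverse=True) on 2-tuples = lexicographic tuple key
  let sp := PySem.List.sorted2 pairs Prod.fst Prod.snd true
  ((pvLoopA sp l []).length : Int)

-- ===== PORT B =====
-- inner 'while k > 0' loop of B: inl = early return, inr = continue with (need, taken)
def pvInnerB (c : Int) (k need taken : Int) : Sum Int (Int × Int) :=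
  if h : 0 < k then
    let need' := need - c
    let taken' := taken + 1
    if need' ≤ 0 then Sum.inl taken' else pvInnerB c (k - 1) need' taken'
  else Sum.inr (need, taken)
termination_by k.toNat
decreasing_by omega

-- outer 'for c in range(n, 0, -1)' loop of B
def pvOuterB (bucket : PySem.Dict Int Int) : List Int → Int → Int → Int
  | [], _, taken => taken
  | c :: cs, need, taken =>
    match pvInnerB c (bucket.getD c 0) need taken with
    | .inl r => r
    | .inr (need', taken') => pvOuterB bucket cs need' taken'

def halfQuestions_alt (questions : List Int) : Int :=
  let n := (questions.length : Int)
  let freq := questions.foldl (fun d q => d.insert q (d.getD q 0 + 1)) PySem.Dict.empty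
  let bucket := freq.values.foldl (fun d c => d.insert c (d.getD c 0 + 1)) PySem.Dict.empty
  let need := PySem.Int.floordiv n 2
  pvOuterB bucket (PySem.List.pyRange n 0 (-1)) need 0

-- ===== PRECONDITION & SPEC =====
def Spec_halfQuestions (questions : List Int) (out : Int) : Prop := out = halfQuestions_alt questions
instance (questions : List Int) (out : Int) : Decidable (Spec_halfQuestions questions out) := by unfold Spec_halfQuestions; infer_instance

-- ===== CLAIM (what is proved, stated in full; the proofs are below) =====
def Claim_equal_halfQuestions : Prop := ∀ (questions : List Int), Dom_halfQuestions questions → Spec_halfQuestions questions (halfQuestions questions)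

-- ===== LEMMAS AND PROOFS =====

-- the common greedy "take counts until need ≤ 0" loop, abstracted over the counts list
def pvGreedy : List Int → Int → Int → Int
  | [], _, taken => taken
  | v :: rest, need, taken =>
    if need - v ≤ 0 then taken + 1 else pvGreedy rest (need - v) (taken + 1)

theorem pvLoopA_length (ps : List (Int × Int)) (l : Int) (lk : List Int) :
    ((pvLoopA ps l lk).length : Int) = pvGreedy (ps.map Prod.fst) l (lk.length : Int) := by
  induction ps generalizing l lk with
  | nil => simp [pvLoopA, pvGreedy]
  | cons p rest ih =>
    obtain ⟨v, k⟩ := p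
    simp only [pvLoopA, pvGreedy, List.map_cons]
    by_cases h : l - v ≤ 0
    · simp [h]
    · simp only [h, if_false]
      rw [ih]
      simp

theorem pvInnerB_greedy (m : Nat) : ∀ (k : Int), k.toNat = m → ∀ (c need taken : Int) (rest : List Int),
    pvGreedy (List.replicate m c ++ rest) need taken =
      (match pvInnerB c k need taken with
       | .inl r => r
       | .inr (need', taken') => pvGreedy rest need' taken') := by
  induction m with
  | zero =>
    intro k hk c need taken rest
    have hk0 : ¬ 0 < k := by omega
    rw [pvInnerB]
    simp [hk0]
  | succ m ih =>
    intro k hk c need taken rest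
    have hk0 : 0 < k := by omega
    rw [pvInnerB]
    simp only [hk0, dif_pos, List.replicate_succ, List.cons_append, pvGreedy]
    by_cases h : need - c ≤ 0
    · simp [h]
    · simp only [h, if_false]
      exact ih (k - 1) (by omega) c (need - c) (taken + 1) rest

theorem pvOuterB_greedy (bucket : PySem.Dict Int Int) (cs : List Int) :
    ∀ (need taken : Int),
    pvOuterB bucket cs need taken =
      pvGreedy (cs.flatMap (fun c => List.replicate (bucket.getD c 0).toNat c)) need taken := by
  induction cs with
  | nil => intro need taken; simp [pvOuterB, pvGreedy]
  | cons c cs ih =>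
    intro need taken
    simp only [pvOuterB, List.flatMap_cons]
    rw [pvInnerB_greedy (bucket.getD c 0).toNat (bucket.getD c 0) rfl c need taken]
    cases hinner : pvInnerB c (bucket.getD c 0) need taken with
    | inl r => rfl
    | inr p => obtain ⟨need', taken'⟩ := p; simp [ih]

-- A's counting dict is Counter(questions)
theorem pvCountA_eq_counter (questions : List Int) :
    pvCountA questions = PySem.Dict.counter questions := by
  unfold pvCountA
  have hf : (fun (d : PySem.Dict Int Int) (q : Int) =>
      if d.contains q = false then d.insert q 1 else d.insert q (d.getD q 0 + 1)) =
      (fun d q => d.insert q (d.getD q 0 + 1)) := by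
    funext d q
    by_cases h : d.contains q
    · simp [h]
    · simp only [Bool.not_eq_true] at h
      rw [PySem.Dict.getD_of_not_contains d 0 h]
      simp [h]
  rw [hf, PySem.Dict.foldl_insert_getD_add_one_eq_counter]

-- count of x in a bucket expansion over a nodup list of candidate counts
theorem count_flatMap_replicate (cs vs : List Int) (hnd : cs.Nodup) (x : Int) :
    (cs.flatMap (fun c => List.replicate (vs.count c) c)).count x =
      if x ∈ cs then vs.count x else 0 := by
  induction cs with
  | nil => simp
  | cons c cs ih =>
    rcases List.nodup_cons.mp hnd with ⟨hc, hnd'⟩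
    simp only [List.flatMap_cons, List.count_append, List.count_replicate, ih hnd', List.mem_cons]
    by_cases hx : x = c
    · subst hx
      simp [hc]
    · have hbeq : (c == x) = false := beq_eq_false_iff_ne.mpr (fun h => hx h.symm)
      simp [hbeq, hx]

-- a bucket expansion over a strictly decreasing list is weakly decreasing
theorem pairwise_flatMap_replicate (cs : List Int) (m : Int → Nat)
    (h : cs.Pairwise (fun a b => b < a)) :
    (cs.flatMap (fun c => List.replicate (m c) c)).Pairwise (fun a b : Int => b ≤ a) := by
  induction cs with
  | nil => simp
  | cons c cs ih =>
    simp only [List.pairwise_cons] at h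
    simp only [List.flatMap_cons]
    refine List.pairwise_append.mpr ⟨?_, ih h.2, ?_⟩
    · exact List.pairwise_replicate.mpr (Or.inr le_rfl)
    · intro a ha b hb
      have ha2 : a = c := List.eq_of_mem_replicate ha
      rcases List.mem_flatMap.mp hb with ⟨d, hd, hbd⟩
      have hb2 : b = d := List.eq_of_mem_replicate hbd
      subst ha2
      subst hb2
      exact le_of_lt (h.1 _ hd)

-- Python's 2-tuple sort is the sort under the lexicographic key
theorem sorted2_eq_sorted_toLex (xs : List (Int × Int)) :
    PySem.List.sorted2 xs Prod.fst Prod.snd true =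
      PySem.List.sorted xs (fun p => (toLex p : Int ×ₗ Int)) true := by
  have hbefore : (fun (a b : Int × Int) => decide (b.1 < a.1) || (!decide (a.1 < b.1) && decide (b.2 < a.2))) =
      (fun (a b : Int × Int) => decide ((toLex b : Int ×ₗ Int) < toLex a)) := by
    funext a b
    by_cases h1 : b.1 < a.1 <;> by_cases h2 : a.1 < b.1 <;> by_cases h3 : b.2 < a.2 <;>
      simp [Prod.Lex.lt_iff, h1, h2, h3] <;> omega
  show List.foldl (fun acc x => PySem.List.insertBy
      (fun (a b : Int × Int) => decide (b.1 < a.1) || (!decide (a.1 < b.1) && decide (b.2 < a.2))) x acc) [] xs =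
    List.foldl (fun acc x => PySem.List.insertBy
      (fun (a b : Int × Int) => decide ((toLex b : Int ×ₗ Int) < toLex a)) x acc) [] xs
  rw [hbefore]

-- descending counts list on the A side
theorem pairwise_mapFst_sorted (xs : List (Int × Int)) :
    ((PySem.List.sorted2 xs Prod.fst Prod.snd true).map Prod.fst).Pairwise (fun a b : Int => b ≤ a) := by
  rw [sorted2_eq_sorted_toLex, List.pairwise_map]
  have h := PySem.List.sorted_pairwise_rev xs (fun p => (toLex p : Int ×ₗ Int))
  refine h.imp ?_
  intro a b hle
  rcases Prod.Lex.le_iff.mp hle with h' | h'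
  · exact le_of_lt h'
  · exact le_of_eq h'.1

-- pyRange n 0 (-1) is strictly decreasing (hence nodup)
theorem pairwise_pyRange_down (n : Int) :
    (PySem.List.pyRange n 0 (-1)).Pairwise (fun a b : Int => b < a) := by
  rw [PySem.List.pyRange_neg_one_eq_reverse, List.pairwise_reverse]
  exact PySem.List.pairwise_lt_pyRange_one 1 (n + 1)

theorem nodup_pyRange_down (n : Int) : (PySem.List.pyRange n 0 (-1)).Nodup :=
  (pairwise_pyRange_down n).imp (fun h => by omega)

-- every multiplicity in Counter(questions).values is in [1, n]
theorem values_counter_bounds (questions : List Int) (v : Int)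
    (hv : v ∈ (PySem.Dict.counter questions).values) :
    1 ≤ v ∧ v ≤ (questions.length : Int) := by
  have hvals : (PySem.Dict.counter questions).values =
      (PySem.Set.ofList questions).map (fun k => ((questions.count k : Nat) : Int)) := by
    show ((PySem.Dict.counter questions).items.map (·.2)) = _
    rw [PySem.Dict.items_counter]
    simp
  rw [hvals, List.mem_map] at hv
  obtain ⟨k, hk, rfl⟩ := hv
  have hkmem : k ∈ questions := (PySem.Set.mem_ofList _ _).mp hk
  constructor
  · exact_mod_cast Nat.succ_le_of_lt (List.count_pos_iff.mpr hkmem)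
  · exact_mod_cast List.count_le_length

-- the central list identity: A's sorted counts = B's bucket expansion
theorem counts_list_eq (questions : List Int) :
    ((PySem.List.sorted2 ((PySem.Dict.counter questions).items.map (fun kv => (kv.2, kv.1)))
        Prod.fst Prod.snd true).map Prod.fst) =
      (PySem.List.pyRange (questions.length : Int) 0 (-1)).flatMap
        (fun c => List.replicate ((PySem.Dict.counter questions).values.count c) c) := by
  set V := (PySem.Dict.counter questions).values with hV
  set pairs := (PySem.Dict.counter questions).items.map (fun kv : Int × Int => (kv.2, kv.1)) with hpairs
  set cs := PySem.List.pyRange (questions.length : Int) 0 (-1) with hcs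
  have hperm1 : ((PySem.List.sorted2 pairs Prod.fst Prod.snd true).map Prod.fst).Perm V := by
    have h := (PySem.List.sorted2_perm pairs Prod.fst Prod.snd true).map Prod.fst
    refine h.trans ?_
    rw [hpairs, List.map_map]
    exact List.Perm.refl _
  have hperm2 : (cs.flatMap (fun c => List.replicate (V.count c) c)).Perm V := by
    rw [List.perm_iff_count]
    intro x
    rw [count_flatMap_replicate cs V (nodup_pyRange_down _) x]
    by_cases hx : x ∈ cs
    · simp [hx]
    · simp only [hx, if_false]
      by_cases hxv : x ∈ V
      · exfalso
        obtain ⟨h1, h2⟩ := values_counter_bounds questions x hxv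
        exact hx (by rw [hcs, PySem.List.mem_pyRange_neg_one]; omega)
      · simp [List.count_eq_zero_of_not_mem hxv]
  refine List.Perm.eq_of_pairwise (le := fun a b : Int => b ≤ a)
    (fun a b _ _ h1 h2 => le_antisymm h2 h1) ?_ ?_ (hperm1.trans hperm2.symm)
  · exact pairwise_mapFst_sorted pairs
  · exact pairwise_flatMap_replicate cs _ (pairwise_pyRange_down _)

-- B's two folds are Counters
theorem freq_eq_counter (questions : List Int) :
    questions.foldl (fun (d : PySem.Dict Int Int) q => d.insert q (d.getD q 0 + 1)) PySem.Dict.empty =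
      PySem.Dict.counter questions :=
  PySem.Dict.foldl_insert_getD_add_one_eq_counter questions

theorem main_eq (questions : List Int) : halfQuestions questions = halfQuestions_alt questions := by
  unfold halfQuestions halfQuestions_alt
  simp only []
  rw [pvCountA_eq_counter, freq_eq_counter, PySem.Dict.foldl_insert_getD_add_one_eq_counter]
  rw [pvOuterB_greedy, pvLoopA_length]
  simp only [List.length_nil, Nat.cast_zero, PySem.Dict.getD_counter, Int.toNat_natCast]
  rw [counts_list_eq]

-- ===== VERDICT (by name: the statement is the Claim_ definition above) =====
theorem halfQuestions_spec : Claim_equal_halfQuestions := by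
  intro questions _
  unfold Spec_halfQuestions
  exact main_eq questions
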